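-- pv_equiv track=rewrite | github.com/bhavya13-ux/PYTHON--PROBLEMS | twoModes.py | twoModes
-- ===== SOURCE A (Python) =====
-- def twoModes(arr):
--     d={}
--     for num in arr:
--         d[num]=d.get(num,0)+1
--
--     maxKey=maxValue=0
--     secMaxKey=secMaxValue=0
--
--     for key in d:
--         if d[key]>maxValue or(d[key]==maxValue and key>maxKey):
--             maxValue=d[key]
--             maxKey=key
--
--     for key in d:
--         if d[key] < maxValue and (
--             d[key] > secMaxValue or
--             (d[key] == secMaxValue and key > secMaxKey)
--         ):
--             secMaxValue=d[key]
--             secMaxKey=key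
--
--     result=((maxKey*maxValue)+(secMaxKey*secMaxValue))//(maxValue+secMaxValue)
--     return result
-- ===== SOURCE B (Python) =====
-- def twoModes(arr):
--     counts = {}
--     for num in arr:
--         counts[num] = counts.get(num, 0) + 1
--     best = (0, 0)      # (count, key), running lexicographic maximum
--     second = (0, 0)    # best (count, key) whose count is strictly below best's count
--     for k, v in counts.items():
--         if (v, k) > best:
--             if v > best[0]:
--                 second = best
--             best = (v, k)
--         elif v < best[0] and (v, k) > second:
--             second = (v, k)
--     return (best[1] * best[0] + second[1] * second[0]) // (best[0] + second[0])
-- ===== Notes on version B (the rewrite author's own statement) =====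
-- stated objective: alternative
-- what changed: Replaces A's two separate full scans of the frequency dict (first find the mode, then rescan for the runner-up strictly below it) by a single combined pass that maintains the top (count,key) pair and the best pair with strictly smaller count simultaneously, promoting the old best to runner-up when a strictly larger count appears.
import Mathlib
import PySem

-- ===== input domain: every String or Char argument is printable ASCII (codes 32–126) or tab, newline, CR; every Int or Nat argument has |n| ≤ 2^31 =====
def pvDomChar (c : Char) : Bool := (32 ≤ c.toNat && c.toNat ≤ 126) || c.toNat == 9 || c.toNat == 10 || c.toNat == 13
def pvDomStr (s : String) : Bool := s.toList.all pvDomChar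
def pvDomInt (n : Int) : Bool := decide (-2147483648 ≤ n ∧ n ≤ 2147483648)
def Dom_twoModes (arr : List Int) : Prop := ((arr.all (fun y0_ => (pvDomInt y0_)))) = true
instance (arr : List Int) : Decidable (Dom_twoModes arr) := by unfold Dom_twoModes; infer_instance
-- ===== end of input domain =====

-- B replaces A's two separate scans of the frequency dict by one combined top-two pass; equal cost, alternative structure.

-- ===== PORT A =====
def twoModes (arr : List Int) : Int :=
  let d := arr.foldl (fun d num => d.insert num (d.getD num 0 + 1)) (PySem.Dict.empty)
  -- for key in d: if d[key]>maxValue or (d[key]==maxValue and key>maxKey): …  (state p = (maxKey, maxValue))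
  let mm := d.keys.foldl (fun (p : Int × Int) key =>
      if d.getD key 0 > p.2 ∨ (d.getD key 0 = p.2 ∧ key > p.1) then (key, d.getD key 0) else p)
    (0, 0)
  -- second loop, state p = (secMaxKey, secMaxValue)
  let ss := d.keys.foldl (fun (p : Int × Int) key =>
      if d.getD key 0 < mm.2 ∧ (d.getD key 0 > p.2 ∨ (d.getD key 0 = p.2 ∧ key > p.1)) then (key, d.getD key 0) else p)
    (0, 0)
  PySem.Int.floordiv (mm.1 * mm.2 + ss.1 * ss.2) (mm.2 + ss.2)

-- ===== PORT B =====
def twoModes_alt (arr : List Int) : Int :=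
  let counts := arr.foldl (fun d num => d.insert num (d.getD num 0 + 1)) (PySem.Dict.empty)
  -- one pass over counts.items(); state s = (best, second), each a (count, key) pair;
  -- Python's tuple '(v, k) > best' is written out as the lexicographic comparison
  let bs := counts.items.foldl (fun (s : (Int × Int) × (Int × Int)) kv =>
      if kv.2 > s.1.1 ∨ (kv.2 = s.1.1 ∧ kv.1 > s.1.2) then
        ((kv.2, kv.1), if kv.2 > s.1.1 then s.1 else s.2)
      else if kv.2 < s.1.1 ∧ (kv.2 > s.2.1 ∨ (kv.2 = s.2.1 ∧ kv.1 > s.2.2)) then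
        (s.1, (kv.2, kv.1))
      else s)
    ((0, 0), (0, 0))
  PySem.Int.floordiv (bs.1.2 * bs.1.1 + bs.2.2 * bs.2.1) (bs.1.1 + bs.2.1)

-- ===== PRECONDITION & SPEC =====
-- Pre_ excludes only the empty list, on which Python A (and B) raise ZeroDivisionError.
def Pre_twoModes (arr : List Int) : Prop := arr ≠ []
instance (arr : List Int) : Decidable (Pre_twoModes arr) := by unfold Pre_twoModes; infer_instance
def pvWitness_twoModes : List Int := [1, 2, 2]

def Spec_twoModes (arr : List Int) (out : Int) : Prop := out = twoModes_alt arr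
instance (arr : List Int) (out : Int) : Decidable (Spec_twoModes arr out) := by unfold Spec_twoModes; infer_instance

-- ===== CLAIM (what is proved, stated in full; the proofs are below) =====
def Claim_equal_twoModes : Prop := ∀ (arr : List Int), Dom_twoModes arr → Pre_twoModes arr → Spec_twoModes arr (twoModes arr)

-- ===== LEMMAS AND PROOFS =====

-- A's first loop, as a fold over the (key, value) item pairs; state (maxKey, maxValue)
def fA1 (L : List (Int × Int)) : Int × Int :=
  L.foldl (fun p kv => if kv.2 > p.2 ∨ (kv.2 = p.2 ∧ kv.1 > p.1) then (kv.1, kv.2) else p) (0, 0)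

-- A's second loop with the max value M fixed; state (secMaxKey, secMaxValue)
def fA2 (M : Int) (L : List (Int × Int)) : Int × Int :=
  L.foldl (fun p kv => if kv.2 < M ∧ (kv.2 > p.2 ∨ (kv.2 = p.2 ∧ kv.1 > p.1)) then (kv.1, kv.2) else p) (0, 0)

-- B's single pass; state (best, second) as (count, key) pairs
def fB (L : List (Int × Int)) : (Int × Int) × (Int × Int) :=
  L.foldl (fun s kv =>
      if kv.2 > s.1.1 ∨ (kv.2 = s.1.1 ∧ kv.1 > s.1.2) then
        ((kv.2, kv.1), if kv.2 > s.1.1 then s.1 else s.2)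
      else if kv.2 < s.1.1 ∧ (kv.2 > s.2.1 ∨ (kv.2 = s.2.1 ∧ kv.1 > s.2.2)) then
        (s.1, (kv.2, kv.1))
      else s)
    ((0, 0), (0, 0))

-- a fold over d.keys that looks each key up equals the fold over d.items
lemma foldl_keys_getD {σ : Type} (d : PySem.Dict Int Int) (hnd : d.keys.Nodup)
    (F : σ → Int → Int → σ) (i : σ) :
    d.keys.foldl (fun p key => F p key (d.getD key 0)) i
      = d.items.foldl (fun p kv => F p kv.1 kv.2) i := by
  have hk : d.keys = d.items.map Prod.fst := rfl
  rw [hk, List.foldl_map]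
  exact PySem.List.foldl_congr_mem _ _ _ _ (fun acc kv hm => by
    rw [PySem.Dict.getD_of_mem_items d (by simpa using hm) hnd])

-- when every value is strictly below M the filter in A's second loop is vacuous
lemma fA2_eq_fA1 (M : Int) (L : List (Int × Int)) (h : ∀ kv ∈ L, kv.2 < M) :
    fA2 M L = fA1 L := by
  unfold fA2 fA1
  exact PySem.List.foldl_congr_mem _ _ _ _ (fun acc kv hm => by
    rw [if_congr (and_iff_right (h kv hm)) rfl rfl])

-- core: B's single pass computes A's two passes, together with the running-max bound
lemma topTwo (L : List (Int × Int)) :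
    fB L = (((fA1 L).2, (fA1 L).1), ((fA2 (fA1 L).2 L).2, (fA2 (fA1 L).2 L).1))
      ∧ ∀ kv ∈ L, kv.2 < (fA1 L).2 ∨ (kv.2 = (fA1 L).2 ∧ kv.1 ≤ (fA1 L).1) := by
  induction L using List.reverseRecOn with
  | nil => simp [fA1, fA2, fB]
  | append_singleton L e ih =>
    obtain ⟨hB, hInv⟩ := ih
    have hA1 : fA1 (L ++ [e])
        = (if e.2 > (fA1 L).2 ∨ (e.2 = (fA1 L).2 ∧ e.1 > (fA1 L).1) then (e.1, e.2) else fA1 L) := by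
      simp [fA1, List.foldl_append]
    have hA2 : ∀ M, fA2 M (L ++ [e])
        = (if e.2 < M ∧ (e.2 > (fA2 M L).2 ∨ (e.2 = (fA2 M L).2 ∧ e.1 > (fA2 M L).1)) then (e.1, e.2) else fA2 M L) := by
      intro M; simp [fA2, List.foldl_append]
    have hfB : fB (L ++ [e])
        = (if e.2 > (fB L).1.1 ∨ (e.2 = (fB L).1.1 ∧ e.1 > (fB L).1.2) then
            ((e.2, e.1), if e.2 > (fB L).1.1 then (fB L).1 else (fB L).2)
          else if e.2 < (fB L).1.1 ∧ (e.2 > (fB L).2.1 ∨ (e.2 = (fB L).2.1 ∧ e.1 > (fB L).2.2)) then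
            ((fB L).1, (e.2, e.1))
          else fB L) := by
      simp [fB, List.foldl_append]
    by_cases h1 : e.2 > (fA1 L).2
    · -- strictly larger count: e becomes the max, the old max becomes the runner-up
      have hall : ∀ kv ∈ L, kv.2 < e.2 := by
        intro kv hkv; rcases hInv kv hkv with h | h <;> omega
      have hs : fA2 e.2 L = fA1 L := fA2_eq_fA1 e.2 L hall
      have hA1' : fA1 (L ++ [e]) = (e.1, e.2) := by rw [hA1, if_pos (Or.inl h1)]
      refine ⟨?_, ?_⟩
      · rw [hfB, hB, hA1']
        simp [h1, hA2, hs]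
      · intro kv hkv
        rw [hA1']
        rcases List.mem_append.1 hkv with h | h
        · exact Or.inl (hall kv h)
        · simp only [List.mem_singleton] at h
          subst h; exact Or.inr ⟨rfl, le_refl _⟩
    · by_cases h2 : e.2 = (fA1 L).2 ∧ e.1 > (fA1 L).1
      · -- equal count, larger key: max key moves to e, runner-up unchanged
        have hA1' : fA1 (L ++ [e]) = (e.1, e.2) := by rw [hA1, if_pos (Or.inr h2)]
        refine ⟨?_, ?_⟩
        · rw [hfB, hB, hA1']
          simp [hA2, h2.1, h2.2]
        · intro kv hkv
          rw [hA1']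
          rcases List.mem_append.1 hkv with h | h
          · rcases hInv kv h with h' | h'
            · exact Or.inl (by omega)
            · exact Or.inr ⟨by omega, by omega⟩
          · simp only [List.mem_singleton] at h
            subst h; exact Or.inr ⟨rfl, le_refl _⟩
      · -- e does not beat the max: max unchanged, the runner-up update is the same test on both sides
        have hne : ¬ (e.2 > (fA1 L).2 ∨ (e.2 = (fA1 L).2 ∧ e.1 > (fA1 L).1)) := by
          rintro (h | h)
          · exact h1 h
          · exact h2 h
        have hA1' : fA1 (L ++ [e]) = fA1 L := by rw [hA1, if_neg hne]
        refine ⟨?_, ?_⟩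
        · rw [hfB, hB, hA1', hA2 (fA1 L).2]
          by_cases h3 : e.2 < (fA1 L).2 ∧ (e.2 > (fA2 (fA1 L).2 L).2 ∨ (e.2 = (fA2 (fA1 L).2 L).2 ∧ e.1 > (fA2 (fA1 L).2 L).1))
          · simp [hne, h3]
          · simp [hne, h3]
        · intro kv hkv
          rw [hA1']
          rcases List.mem_append.1 hkv with h | h
          · exact hInv kv h
          · simp only [List.mem_singleton] at h
            subst h
            push Not at hne
            rcases lt_or_eq_of_le hne.1 with h' | h'
            · exact Or.inl h'
            · exact Or.inr ⟨h', hne.2 h'⟩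

-- A's first loop over the built dict, moved from keys to items
lemma loop1_items (d : PySem.Dict Int Int) (hnd : d.keys.Nodup) :
    d.keys.foldl (fun (p : Int × Int) key =>
        if d.getD key 0 > p.2 ∨ (d.getD key 0 = p.2 ∧ key > p.1) then (key, d.getD key 0) else p) (0, 0)
      = fA1 d.items :=
  foldl_keys_getD d hnd (fun p k v => if v > p.2 ∨ (v = p.2 ∧ k > p.1) then (k, v) else p) (0, 0)

-- A's second loop over the built dict, moved from keys to items
lemma loop2_items (d : PySem.Dict Int Int) (hnd : d.keys.Nodup) (M : Int) :
    d.keys.foldl (fun (p : Int × Int) key =>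
        if d.getD key 0 < M ∧ (d.getD key 0 > p.2 ∨ (d.getD key 0 = p.2 ∧ key > p.1)) then (key, d.getD key 0) else p) (0, 0)
      = fA2 M d.items :=
  foldl_keys_getD d hnd (fun p k v => if v < M ∧ (v > p.2 ∨ (v = p.2 ∧ k > p.1)) then (k, v) else p) (0, 0)

theorem twoModes_spec_aux (arr : List Int) : twoModes arr = twoModes_alt arr := by
  have hnd : (arr.foldl (fun d num => d.insert num (d.getD num 0 + 1)) (PySem.Dict.empty : PySem.Dict Int Int)).keys.Nodup :=
    PySem.Dict.nodup_keys_foldl_insert arr (fun d num => d.getD num 0 + 1) PySem.Dict.empty PySem.Dict.nodup_keys_empty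
  simp only [twoModes, twoModes_alt]
  set d := arr.foldl (fun d num => d.insert num (d.getD num 0 + 1)) (PySem.Dict.empty : PySem.Dict Int Int) with hd
  have hbb := (topTwo d.items).1
  unfold fB at hbb
  rw [loop1_items d hnd, loop2_items d hnd, hbb]

-- ===== VERDICT (by name: the statement is the Claim_ definition above) =====
theorem twoModes_spec : Claim_equal_twoModes := by
  unfold Claim_equal_twoModes
  intro arr _ _
  exact twoModes_spec_aux arr
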